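-- pv_equiv track=rewrite | github.com/yunzae/ProblemSolving | 자료구조/카카오 신고 결과 받기.py | solution
-- ===== SOURCE A (Python) =====
-- from collections import defaultdict
--
-- def solution(id_list, report, k):
--     answer = []
--     report = list(set(report))
--     count_dic = defaultdict(int)
--     mail_dic = defaultdict(set)
--     result_dic = defaultdict(int)
--
--     for r in report:
--         a, b = r.split(" ")
--         count_dic[b] += 1
--         mail_dic[b].add(a)
--
--     for id in id_list:
--         for m in mail_dic[id]:
--             if (count_dic[id] // k) >= 1:
--                 result_dic[m] += 1
--
--     for id in id_list:
--         answer.append(result_dic[id])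
--
--     return answer
-- ===== SOURCE B (Python) =====
-- from collections import Counter, defaultdict
--
-- def solution(id_list, report, k):
--     pairs = [r.split(" ") for r in set(report)]
--     cnt = Counter(b for _, b in pairs)
--     banned = Counter(u for u in id_list if cnt[u] // k >= 1)
--     reported_by = defaultdict(set)
--     for a, b in pairs:
--         reported_by[a].add(b)
--     return [sum(banned[b] for b in reported_by[i]) for i in id_list]
-- ===== Notes on version B (the rewrite author's own statement) =====
-- stated objective: alternative
-- what changed: Replaces A's reported-centric double increment loop (for each id, bump result_dic[m] for every reporter m of id) with a reporter-centric computation: dedup reports into (reporter, reported) pairs, count reports per reported user with a Counter, build a Counter of banned occurrences over id_list, transpose into reported_by[reporter] and answer each id by summing banned multiplicities over its reported set.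
-- outside the precondition, e.g. on solution(['a'], [], 0): A returns [0], B raises ZeroDivisionError
import Mathlib
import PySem

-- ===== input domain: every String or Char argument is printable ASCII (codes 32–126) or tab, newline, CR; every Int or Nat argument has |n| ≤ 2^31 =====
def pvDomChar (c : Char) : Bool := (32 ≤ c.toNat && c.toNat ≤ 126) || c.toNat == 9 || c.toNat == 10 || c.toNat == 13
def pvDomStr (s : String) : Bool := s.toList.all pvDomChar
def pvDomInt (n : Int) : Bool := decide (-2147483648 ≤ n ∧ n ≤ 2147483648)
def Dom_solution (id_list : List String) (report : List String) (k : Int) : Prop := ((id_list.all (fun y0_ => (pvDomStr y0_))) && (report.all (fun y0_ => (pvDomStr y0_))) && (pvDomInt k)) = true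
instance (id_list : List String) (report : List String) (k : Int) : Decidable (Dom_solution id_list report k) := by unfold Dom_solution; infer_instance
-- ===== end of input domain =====

-- B replaces A's reported-centric nested increment loops by a reporter-centric computation
-- (deduplicated (reporter, reported) pairs, a Counter of banned occurrences over id_list,
-- and a per-reporter sum of banned multiplicities); alternative structure, similar cost.

-- ===== PORT A =====
def solution (id_list : List String) (report : List String) (k : Int) : List Int :=
  let report' := PySem.Set.ofList report
  let cm : PySem.Dict String Int × PySem.Dict String (PySem.Set String) :=
    report'.foldl (fun p r =>
      match PySem.Str.split? r " " with
      | some [a, b] =>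
          (p.1.insert b (p.1.getD b 0 + 1),
           p.2.insert b (PySem.Set.add (p.2.getD b []) a))
      | _ => p)  -- 'a, b = r.split(" ")' raises ValueError here (excluded by Pre_)
      (PySem.Dict.empty, PySem.Dict.empty)
  let count_dic := cm.1
  let mail_dic := cm.2
  let result_dic : PySem.Dict String Int :=
    id_list.foldl (fun rd id =>
      (mail_dic.getD id []).foldl (fun rd m =>
        if PySem.Int.floordiv (count_dic.getD id 0) k ≥ 1 then
          rd.insert m (rd.getD m 0 + 1)
        else rd) rd)
      PySem.Dict.empty
  id_list.foldl (fun answer id => answer ++ [result_dic.getD id 0]) []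

-- ===== PORT B =====
def solution_alt (id_list : List String) (report : List String) (k : Int) : List Int :=
  let pairs : List (String × String) :=
    (PySem.Set.ofList report).map (fun r =>
      -- 'r.split(" ")' unpacked to its two fields; a malformed report (excluded by Pre_)
      -- makes Python B raise later, here it yields "" fields
      let parts := (PySem.Str.split? r " ").getD []
      (parts.headD "", parts.tail.headD ""))
  let cnt : PySem.Dict String Int := PySem.Dict.counter (pairs.map (·.2))
  let banned : PySem.Dict String Int :=
    PySem.Dict.counter (id_list.filter (fun u => PySem.Int.floordiv (cnt.getD u 0) k ≥ 1))
  let reported_by : PySem.Dict String (PySem.Set String) :=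
    pairs.foldl (fun d p => d.insert p.1 (PySem.Set.add (d.getD p.1 []) p.2)) PySem.Dict.empty
  id_list.map (fun i => ((reported_by.getD i []).map (fun b => banned.getD b 0)).sum)


-- ===== PRECONDITION & SPEC =====
-- Pre_ excludes (i) reports that are not "x y" with exactly one space, where A raises ValueError,
-- and (ii) k = 0, where A raises ZeroDivisionError except on degenerate inputs on which no id in
-- id_list was ever reported (there A returns zeros but B still divides by k and raises).
def Pre_solution (id_list : List String) (report : List String) (k : Int) : Prop :=
  k ≠ 0 ∧ ∀ r ∈ report, ((PySem.Str.split? r " ").getD []).length = 2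
instance (id_list : List String) (report : List String) (k : Int) : Decidable (Pre_solution id_list report k) := by unfold Pre_solution; infer_instance

def pvWitness_solution : List String × List String × Int := (["a", "b"], ["a b", "b a"], 1)

def Spec_solution (id_list : List String) (report : List String) (k : Int) (out : List Int) : Prop := out = solution_alt id_list report k
instance (id_list : List String) (report : List String) (k : Int) (out : List Int) : Decidable (Spec_solution id_list report k out) := by unfold Spec_solution; infer_instance

-- ===== CLAIM (what is proved, stated in full; the proofs are below) =====
def Claim_equal_solution : Prop := ∀ (id_list : List String) (report : List String) (k : Int), Dom_solution id_list report k → Pre_solution id_list report k → Spec_solution id_list report k (solution id_list report k)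

-- ===== LEMMAS AND PROOFS =====

def pairOf (r : String) : String × String :=
  let parts := (PySem.Str.split? r " ").getD []
  (parts.headD "", parts.tail.headD "")

def pairsOf (report : List String) : List (String × String) :=
  (PySem.Set.ofList report).map pairOf

theorem pairOf_spec (r : String) (h : ((PySem.Str.split? r " ").getD []).length = 2) :
    PySem.Str.split? r " " = some [(pairOf r).1, (pairOf r).2] := by
  unfold pairOf
  cases hsp : PySem.Str.split? r " " with
  | none => rw [hsp] at h; simp at h
  | some l =>
    rw [hsp] at h; simp at h
    cases l with
    | nil => simp at h
    | cons a t =>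
      cases t with
      | nil => simp at h
      | cons b t2 =>
        cases t2 with
        | nil => simp
        | cons c t3 => simp at h

theorem mem_groupFold (key val : String × String → String) :
    ∀ (l : List (String × String)) (d : PySem.Dict String (PySem.Set String)) (x y : String),
      x ∈ (l.foldl (fun d p => d.insert (key p) (PySem.Set.add (d.getD (key p) []) (val p))) d).getD y []
        ↔ x ∈ d.getD y [] ∨ ∃ p ∈ l, key p = y ∧ val p = x := by
  intro l
  induction l with
  | nil => intro d x y; simp
  | cons p l ih =>
    intro d x y
    simp only [List.foldl_cons, ih, PySem.Dict.getD_insert]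
    by_cases h : y = key p
    · subst h; simp [PySem.Set.mem_add]; tauto
    · simp [h, Ne.symm h]

theorem nodup_groupFold (key val : String × String → String) :
    ∀ (l : List (String × String)) (d : PySem.Dict String (PySem.Set String)),
      (∀ y, (d.getD y []).Nodup) → ∀ y,
      ((l.foldl (fun d p => d.insert (key p) (PySem.Set.add (d.getD (key p) []) (val p))) d).getD y []).Nodup := by
  intro l
  induction l with
  | nil => intro d hd y; simpa using hd y
  | cons p l ih =>
    intro d hd y
    refine ih _ ?_ y
    intro z
    rw [PySem.Dict.getD_insert]
    split_ifs with h
    · exact PySem.Set.nodup_add _ _ (hd _)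
    · exact hd z

theorem innerCount (c : Prop) [Decidable c] (S : List String) (rd : PySem.Dict String Int)
    (m : String) (hS : S.Nodup) :
    ((S.foldl (fun rd m' => if c then rd.insert m' (rd.getD m' 0 + 1) else rd) rd).getD m 0)
      = rd.getD m 0 + (if c ∧ m ∈ S then 1 else 0) := by
  by_cases hc : c
  · simp only [hc, true_and, if_true]
    rw [PySem.Dict.getD_foldl_insert_add_one]
    by_cases hm : m ∈ S
    · simp [hm, List.count_eq_one_of_mem hS hm]
    · simp [hm, List.count_eq_zero_of_not_mem hm]
  · simp only [hc, false_and, if_false, add_zero]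
    rw [PySem.List.foldl_ignore]

theorem outerCount (mail : String → List String) (cond : String → Prop) [DecidablePred cond]
    (hnd : ∀ u, (mail u).Nodup) :
    ∀ (L : List String) (rd : PySem.Dict String Int) (m : String),
      ((L.foldl (fun rd u =>
          (mail u).foldl (fun rd m' =>
            if cond u then rd.insert m' (rd.getD m' 0 + 1) else rd) rd) rd).getD m 0)
        = rd.getD m 0 + (L.map (fun u => if cond u ∧ m ∈ mail u then (1 : Int) else 0)).sum := by
  intro L
  induction L with
  | nil => intro rd m; simp
  | cons u L ih =>
    intro rd m
    simp only [List.foldl_cons, List.map_cons, List.sum_cons, ih,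
      innerCount (cond u) (mail u) _ m (hnd u)]
    ring

theorem sum_ind (u : String) :
    ∀ (S : List String), S.Nodup →
      (S.map (fun b => if b = u then (1 : Int) else 0)).sum = if u ∈ S then 1 else 0 := by
  intro S
  induction S with
  | nil => simp
  | cons b S ih =>
    intro h
    rcases List.nodup_cons.mp h with ⟨hb, hS⟩
    simp only [List.map_cons, List.sum_cons, ih hS, List.mem_cons]
    by_cases hbu : b = u
    · subst hbu; simp [hb]
    · simp [hbu, Ne.symm hbu]

theorem sum_count_filter (p : String → Bool) :
    ∀ (L S : List String), S.Nodup →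
      (S.map (fun b => ((L.filter p).count b : Int))).sum
        = (L.map (fun u => if p u = true ∧ u ∈ S then (1 : Int) else 0)).sum := by
  intro L
  induction L with
  | nil => intro S hS; simp
  | cons u L ih =>
    intro S hS
    by_cases hp : p u
    · simp only [List.filter_cons, hp, if_true, List.map_cons, List.sum_cons, true_and]
      have h1 : ∀ b ∈ S, ((((u :: L.filter p).count b : Nat)) : Int)
          = (if b = u then (1:Int) else 0) + ((L.filter p).count b : Int) := by
        intro b _
        by_cases hbu : b = u
        · subst hbu; simp [List.count_cons_self]; ring
        · simp [hbu, Ne.symm hbu]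
      rw [List.map_congr_left h1, PySem.List.sum_map_add_int, sum_ind u S hS, ih S hS]
    · simp only [List.filter_cons, hp, Bool.false_eq_true, if_false, List.map_cons, List.sum_cons]
      rw [ih S hS]
      simp only [false_and, if_false, zero_add]

theorem firstFold (report : List String)
    (hwf : ∀ r ∈ report, ((PySem.Str.split? r " ").getD []).length = 2) :
    (PySem.Set.ofList report).foldl (fun p r =>
      match PySem.Str.split? r " " with
      | some [a, b] =>
          (p.1.insert b (p.1.getD b 0 + 1),
           p.2.insert b (PySem.Set.add (p.2.getD b []) a))
      | _ => p) ((PySem.Dict.empty : PySem.Dict String Int), (PySem.Dict.empty : PySem.Dict String (PySem.Set String)))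
    = (PySem.Dict.counter ((pairsOf report).map (·.2)),
       (pairsOf report).foldl (fun d p => d.insert p.2 (PySem.Set.add (d.getD p.2 []) p.1)) PySem.Dict.empty) := by
  refine Eq.trans (PySem.List.foldl_congr_mem (PySem.Set.ofList report) _
      (fun (acc : PySem.Dict String Int × PySem.Dict String (PySem.Set String)) r =>
        (acc.1.insert (pairOf r).2 (acc.1.getD (pairOf r).2 0 + 1),
         acc.2.insert (pairOf r).2 (PySem.Set.add (acc.2.getD (pairOf r).2 []) (pairOf r).1)))
      _ ?_) ?_
  · intro acc r hr
    rw [pairOf_spec r (hwf r ((PySem.Set.mem_ofList report r).mp hr))]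
  rw [← PySem.Dict.foldl_insert_getD_add_one_eq_counter, List.foldl_map]
  rw [pairsOf, List.foldl_map]
  rw [PySem.List.foldl_prod_mk
      (f := fun (d : PySem.Dict String Int) (r : String) => d.insert (pairOf r).2 (d.getD (pairOf r).2 0 + 1))
      (g := fun (d : PySem.Dict String (PySem.Set String)) (r : String) => d.insert (pairOf r).2 (PySem.Set.add (d.getD (pairOf r).2 []) (pairOf r).1))]
  · rw [List.foldl_map]

theorem solution_eq_alt (id_list report : List String) (k : Int)
    (hwf : ∀ r ∈ report, ((PySem.Str.split? r " ").getD []).length = 2) :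
    solution id_list report k = solution_alt id_list report k := by
  simp only [solution, solution_alt]
  rw [firstFold report hwf]
  have hpairs : ((PySem.Set.ofList report).map (fun r =>
      let parts := (PySem.Str.split? r " ").getD []
      (parts.headD "", parts.tail.headD ""))) = pairsOf report := rfl
  rw [hpairs, PySem.List.foldl_append_singleton_eq_map, List.nil_append]
  refine List.map_congr_left ?_
  intro m hm
  dsimp only
  have hndmail : ∀ u, (((pairsOf report).foldl
      (fun d p => d.insert p.2 (PySem.Set.add (d.getD p.2 []) p.1)) PySem.Dict.empty).getD u []).Nodup :=
    nodup_groupFold (fun p => p.2) (fun p => p.1) (pairsOf report) PySem.Dict.empty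
      (by intro y; simp)
  have hndrb : ∀ u, (((pairsOf report).foldl
      (fun d p => d.insert p.1 (PySem.Set.add (d.getD p.1 []) p.2)) PySem.Dict.empty).getD u []).Nodup :=
    nodup_groupFold (fun p => p.1) (fun p => p.2) (pairsOf report) PySem.Dict.empty
      (by intro y; simp)
  rw [outerCount _
      (fun u => PySem.Int.floordiv ((PySem.Dict.counter ((pairsOf report).map (fun x => x.2))).getD u 0) k ≥ 1)
      hndmail id_list PySem.Dict.empty m]
  rw [PySem.Dict.getD_empty, zero_add]
  have hb : ∀ b ∈ (((pairsOf report).foldl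
        (fun d p => d.insert p.1 (PySem.Set.add (d.getD p.1 []) p.2)) PySem.Dict.empty).getD m []),
      (PySem.Dict.counter (id_list.filter
        (fun u => decide (PySem.Int.floordiv ((PySem.Dict.counter ((pairsOf report).map (fun x => x.2))).getD u 0) k ≥ 1)))).getD b 0
      = ((id_list.filter
        (fun u => decide (PySem.Int.floordiv ((PySem.Dict.counter ((pairsOf report).map (fun x => x.2))).getD u 0) k ≥ 1))).count b : Int) := by
    intro b _
    exact PySem.Dict.getD_counter _ b
  rw [List.map_congr_left hb,
      sum_count_filter _ id_list _ (hndrb m)]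
  refine congrArg List.sum (List.map_congr_left ?_)
  intro u _
  refine if_congr (and_congr ?_ ?_) rfl rfl
  · simp
  · rw [mem_groupFold (fun p => p.2) (fun p => p.1) (pairsOf report),
        mem_groupFold (fun p => p.1) (fun p => p.2) (pairsOf report)]
    simp only [PySem.Dict.getD_empty, List.not_mem_nil, false_or]
    constructor
    · rintro ⟨q, hq, h2, h1⟩; exact ⟨q, hq, h1, h2⟩
    · rintro ⟨q, hq, h1, h2⟩; exact ⟨q, hq, h2, h1⟩

-- ===== VERDICT (by name: the statement is the Claim_ definition above) =====
theorem solution_spec : Claim_equal_solution := by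
  intro id_list report k _hdom hpre
  exact solution_eq_alt id_list report k hpre.2
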